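-- pv_equiv track=rewrite | github.com/fjdu/rac-2d | utils_python/draw/long_function_definitions.py | make_fname_from_namelist
-- ===== SOURCE A (Python) =====
-- def make_fname_from_namelist(name_list):
--     s = ''
--     chars_to_avoid = '#%&{}\\<>*?/ &^$!`\'":@+|='
--     for item in name_list:
--         for it in item:
--             s = s + '_' + it['name']
--     t = ''
--     for c in s[1:]:
--         if c not in chars_to_avoid:
--             t = t + c
--         else:
--             t = t + '_'
--     return t
-- ===== SOURCE B (Python) =====
-- def make_fname_from_namelist(name_list):
--     avoid = frozenset('#%&{}\\<>*?/ &^$!`\'":@+|=')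
--     parts = []
--     for item in name_list:
--         for it in item:
--             parts.append(''.join('_' if c in avoid else c for c in it['name']))
--     return '_'.join(parts)
-- ===== Notes on version B (the rewrite author's own statement) =====
-- stated objective: alternative
-- what changed: B never builds or rescans the underscore-prefixed concatenation: it sanitizes each name independently as it is collected (correct because the separator '_' is a fixed point of sanitization) and joins the already-clean parts, so A's slice-off-the-leading-underscore and whole-string second pass disappear.
import Mathlib
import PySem

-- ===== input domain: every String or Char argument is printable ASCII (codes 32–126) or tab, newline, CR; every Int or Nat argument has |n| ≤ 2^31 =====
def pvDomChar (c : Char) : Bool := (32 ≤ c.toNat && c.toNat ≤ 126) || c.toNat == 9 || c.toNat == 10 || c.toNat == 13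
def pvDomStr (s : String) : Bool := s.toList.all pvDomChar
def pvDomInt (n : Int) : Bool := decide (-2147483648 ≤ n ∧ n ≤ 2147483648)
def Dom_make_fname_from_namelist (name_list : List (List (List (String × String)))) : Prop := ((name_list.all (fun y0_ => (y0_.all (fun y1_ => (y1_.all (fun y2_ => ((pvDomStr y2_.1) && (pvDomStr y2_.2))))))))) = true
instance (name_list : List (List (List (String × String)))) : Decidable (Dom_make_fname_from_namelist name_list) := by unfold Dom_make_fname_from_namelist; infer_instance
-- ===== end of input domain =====

-- B sanitizes each name independently as it is collected and joins the clean parts with '_'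
-- (sound because '_' is a fixed point of the sanitization), instead of A's
-- build-one-underscore-prefixed-string, slice off the head, then rescan it char by char
-- (objective: alternative; no quadratic concatenation).

-- ===== PORT A =====
-- the literal chars_to_avoid string, as code points
def pvAvoid : List Char := "#%&{}\\<>*?/ &^$!`'\":@+|=".toList

-- it['name'] : first matching key; Pre_ guarantees the key exists (else Python raises KeyError)
def pvName (it : List (String × String)) : String :=
  (((it.find? (fun p => p.1 == "name")).map (fun p => p.2)).getD "")

def make_fname_from_namelist (name_list : List (List (List (String × String)))) : String :=
  let s : List Char :=
    name_list.foldl (fun s item =>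
      item.foldl (fun s it => s ++ '_' :: (pvName it).toList) s) []
  let t : List Char :=
    (PySem.List.slice s (some 1) none).foldl
      (fun t c => if ¬ pvAvoid.contains c then t ++ [c] else t ++ ['_']) []
  String.ofList t

-- ===== PORT B =====
-- ''.join('_' if c in avoid else c for c in name): one name sanitized on its own
def pvSan (n : String) : List Char :=
  n.toList.map (fun c => if pvAvoid.contains c then '_' else c)

def make_fname_from_namelist_alt (name_list : List (List (List (String × String)))) : String :=
  let parts : List (List Char) :=
    name_list.foldl (fun ps item =>
      item.foldl (fun ps it => ps ++ [pvSan (pvName it)]) ps) []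
  String.ofList (PySem.Chars.join ['_'] parts)

-- ===== PRECONDITION & SPEC =====
-- Pre_ excludes exactly the inputs where some inner dict lacks the key 'name': there A raises KeyError.
def Pre_make_fname_from_namelist (name_list : List (List (List (String × String)))) : Prop :=
  (name_list.all (fun item => item.all (fun it => it.any (fun p => p.1 == "name")))) = true
instance (name_list : List (List (List (String × String)))) : Decidable (Pre_make_fname_from_namelist name_list) := by unfold Pre_make_fname_from_namelist; infer_instance

def pvWitness_make_fname_from_namelist : (List (List (List (String × String)))) :=
  [[[("name", "ab c")], [("name", "x")]], [[("name", "d:e")]]]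

def Spec_make_fname_from_namelist (name_list : List (List (List (String × String)))) (out : String) : Prop := out = make_fname_from_namelist_alt name_list
instance (name_list : List (List (List (String × String)))) (out : String) : Decidable (Spec_make_fname_from_namelist name_list out) := by unfold Spec_make_fname_from_namelist; infer_instance

-- ===== CLAIM (what is proved, stated in full; the proofs are below) =====
def Claim_equal_make_fname_from_namelist : Prop := ∀ (name_list : List (List (List (String × String)))), Dom_make_fname_from_namelist name_list → Pre_make_fname_from_namelist name_list → Spec_make_fname_from_namelist name_list (make_fname_from_namelist name_list)

-- ===== LEMMAS AND PROOFS =====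

-- the sanitization as a per-character function
def pvTr (c : Char) : Char := if pvAvoid.contains c then '_' else c

-- A's accumulation phase: s is the names, each prefixed by '_'
theorem pv_inner (item : List (List (String × String))) (acc : List Char) :
    item.foldl (fun s it => s ++ '_' :: (pvName it).toList) acc
      = acc ++ (item.map pvName).flatMap (fun n => '_' :: n.toList) := by
  induction item generalizing acc with
  | nil => simp
  | cons it rest ih => simp [ih]

theorem pv_outer (nl : List (List (List (String × String)))) (acc : List Char) :
    nl.foldl (fun s item => item.foldl (fun s it => s ++ '_' :: (pvName it).toList) s) acc
      = acc ++ (nl.flatMap (fun item => item.map pvName)).flatMap (fun n => '_' :: n.toList) := by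
  induction nl generalizing acc with
  | nil => simp
  | cons item rest ih =>
    rw [List.foldl_cons, pv_inner, ih]
    simp [List.flatMap_cons, List.flatMap_append, List.append_assoc]

-- dropping the leading '_' of A's s gives exactly the '_'-join of the names
theorem pv_drop_join (names : List String) :
    (names.flatMap (fun n => '_' :: n.toList)).tail
      = PySem.Chars.join ['_'] (names.map String.toList) := by
  induction names with
  | nil => simp [PySem.Chars.join_nil]
  | cons n rest ih =>
    cases rest with
    | nil => simp [PySem.Chars.join_singleton]
    | cons m rest' =>
      simp only [List.map_cons]
      rw [PySem.Chars.join_cons_cons]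
      simp only [List.map_cons] at ih
      simp only [List.flatMap_cons] at ih ⊢
      simp [← ih]

-- A's sanitizing loop is a map with pvTr
theorem pv_sanitize (cs : List Char) (acc : List Char) :
    cs.foldl (fun t c => if ¬ pvAvoid.contains c then t ++ [c] else t ++ ['_']) acc
      = acc ++ cs.map pvTr := by
  induction cs generalizing acc with
  | nil => simp
  | cons c rest ih =>
    rw [List.foldl_cons, ih]
    by_cases h : c ∈ pvAvoid <;> simp [pvTr, h]

-- B's collection phase: parts are the sanitized names in order
theorem pv_parts_inner (item : List (List (String × String))) (acc : List (List Char)) :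
    item.foldl (fun ps it => ps ++ [pvSan (pvName it)]) acc
      = acc ++ item.map (fun it => pvSan (pvName it)) := by
  induction item generalizing acc with
  | nil => simp
  | cons it rest ih => simp [ih]

theorem pv_parts_outer (nl : List (List (List (String × String)))) (acc : List (List Char)) :
    nl.foldl (fun ps item => item.foldl (fun ps it => ps ++ [pvSan (pvName it)]) ps) acc
      = acc ++ (nl.flatMap (fun item => item.map pvName)).map (fun n => pvSan n) := by
  induction nl generalizing acc with
  | nil => simp
  | cons item rest ih =>
    rw [List.foldl_cons, pv_parts_inner, ih]
    simp [List.flatMap_cons, List.map_append, List.append_assoc]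

theorem pv_map_intersperse {α β : Type} (f : α → β) (sep : α) (l : List α) :
    (l.intersperse sep).map f = (l.map f).intersperse (f sep) := by
  induction l with
  | nil => simp
  | cons x t ih =>
    cases t with
    | nil => simp
    | cons y t' => simp only [List.intersperse, List.map_cons] at *; simp [ih]

-- mapping a character function through a join maps the separator too
theorem pv_map_join (f : Char → Char) (sep : List Char) (ls : List (List Char)) :
    (PySem.Chars.join sep ls).map f = PySem.Chars.join (sep.map f) (ls.map (·.map f)) := by
  simp [PySem.Chars.join, List.intercalate, pv_map_intersperse (List.map f) sep ls]

-- ===== VERDICT (by name: the statement is the Claim_ definition above) =====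
theorem make_fname_from_namelist_spec : Claim_equal_make_fname_from_namelist := by
  intro nl _ _
  unfold Spec_make_fname_from_namelist
  dsimp only [make_fname_from_namelist, make_fname_from_namelist_alt]
  rw [pv_outer, PySem.List.slice_from_one, pv_sanitize, pv_parts_outer]
  simp only [List.nil_append, pv_drop_join, pv_map_join pvTr ['_']]
  have h : List.map pvTr ['_'] = ['_'] := by decide
  rw [h, List.map_map]
  simp only [Function.comp_def, pvSan]
  rfl
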